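-- pv_equiv track=rewrite | github.com/rlorigro/runlength_analysis | measure_runlength_from_reference.py | count_runlength_per_character
-- ===== SOURCE A (Python) =====
-- from collections import defaultdict, Counter
--
-- def count_runlength_per_character(sequence):
--     """
--     For each observed character, append observed runlengths of that character to a list in a dictionary with key=char
--     :param sequence:
--     :return:
--     """
--     character_counts = defaultdict(list)
--     current_character = None
--
--     for character in sequence:
--         if character != current_character:
--             character_counts[character].append(1)
--         else:
--             character_counts[character][-1] += 1
--
--         current_character = character
--
--     return character_counts
-- ===== SOURCE B (Python) =====
-- from collections import defaultdict
--
--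
-- def count_runlength_per_character(sequence):
--     """
--     For each observed character, append observed runlengths of that character to a list in a dictionary with key=char
--     :param sequence:
--     :return:
--     """
--     character_counts = defaultdict(list)
--
--     n = len(sequence)
--     starts = [i for i in range(n) if i == 0 or sequence[i] != sequence[i - 1]]
--     bounds = starts + [n]
--
--     for j in range(len(starts)):
--         character_counts[sequence[starts[j]]].append(bounds[j + 1] - bounds[j])
--
--     return character_counts
-- ===== Notes on version B (the rewrite author's own statement) =====
-- stated objective: alternative
-- what changed: B first computes the list of run-start indices (positions where the character differs from its predecessor), appends the sequence length as a final boundary, and obtains each run length as the difference of consecutive boundaries, instead of A's single pass that tracks the previous character and increments the list's last element in place.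
import Mathlib
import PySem

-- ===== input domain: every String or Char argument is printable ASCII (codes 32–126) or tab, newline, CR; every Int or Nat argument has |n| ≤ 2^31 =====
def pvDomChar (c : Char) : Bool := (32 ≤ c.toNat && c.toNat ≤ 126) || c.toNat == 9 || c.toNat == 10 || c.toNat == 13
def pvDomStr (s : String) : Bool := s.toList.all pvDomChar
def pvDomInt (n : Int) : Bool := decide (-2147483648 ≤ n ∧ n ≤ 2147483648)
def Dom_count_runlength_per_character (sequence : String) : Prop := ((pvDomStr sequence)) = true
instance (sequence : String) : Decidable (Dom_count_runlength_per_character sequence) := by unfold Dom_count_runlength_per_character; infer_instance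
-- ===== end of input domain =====

-- B replaces A's per-character loop (tracking the previous character and bumping the
-- list's last element) by a staged boundary computation: the run-start indices are
-- collected first, the sequence length closes the boundary list, and each run length
-- is the difference of consecutive boundaries; same O(n) cost, different decomposition.


-- ===== PORT A =====
-- one loop iteration of A: `if character != current_character: d[character].append(1)
-- else: d[character][-1] += 1; current_character = character` (defaultdict access = modify with default []).
-- `l[-1] += 1` is ported with pyGetD/pySetD at index -1; the else branch only runs when the
-- character equals the previous one, so the list there is nonempty (Python never raises).
def pvStepA (st : PySem.Dict String (List Int) × Option Char) (ch : Char) :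
    PySem.Dict String (List Int) × Option Char :=
  let key := String.singleton ch
  let d :=
    if some ch ≠ st.2 then
      st.1.modify key [] (fun l => l ++ [1])
    else
      st.1.modify key [] (fun l => PySem.List.pySetD l (-1) (PySem.List.pyGetD l (-1) 0 + 1))
  (d, some ch)

def count_runlength_per_character (sequence : String) : List (String × List Int) :=
  (sequence.toList.foldl pvStepA (PySem.Dict.empty, none)).1.items

-- ===== PORT B =====
-- `i == 0 or sequence[i] != sequence[i-1]` (both indexings are in range for i in range(n))
def pvIsStart (s : List Char) (i : Int) : Bool :=
  i == 0 || (PySem.List.pyGet? s i != PySem.List.pyGet? s (i - 1))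

-- `starts = [i for i in range(n) if i == 0 or sequence[i] != sequence[i-1]]`
def pvStarts (s : List Char) : List Int :=
  (PySem.List.pyRange 0 (s.length : Int) 1).filter (pvIsStart s)

-- `bounds = starts + [n]`, then the loop over `j in range(len(starts))` appending
-- `bounds[j+1] - bounds[j]` under key `sequence[starts[j]]`.  All the indexings
-- (`sequence[starts[j]]`, `bounds[j]`, `bounds[j+1]`) are in range, so pyGetD with a
-- dummy default is exact.
def count_runlength_per_character_alt (sequence : String) : List (String × List Int) :=
  let s := sequence.toList
  let starts := pvStarts s
  let bounds := starts ++ [(s.length : Int)]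
  ((PySem.List.pyRange 0 (starts.length : Int) 1).foldl
    (fun d j =>
      d.modify (String.singleton (PySem.List.pyGetD s (PySem.List.pyGetD starts j 0) ' ')) []
        (fun l => l ++ [PySem.List.pyGetD bounds (j + 1) 0 - PySem.List.pyGetD bounds j 0]))
    PySem.Dict.empty).items

-- ===== PRECONDITION & SPEC =====
def Spec_count_runlength_per_character (sequence : String) (out : List (String × List Int)) : Prop := out = count_runlength_per_character_alt sequence
instance (sequence : String) (out : List (String × List Int)) : Decidable (Spec_count_runlength_per_character sequence out) := by unfold Spec_count_runlength_per_character; infer_instance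

-- ===== CLAIM (what is proved, stated in full; the proofs are below) =====
def Claim_equal_count_runlength_per_character : Prop := ∀ (sequence : String), Dom_count_runlength_per_character sequence → Spec_count_runlength_per_character sequence (count_runlength_per_character sequence)

-- ===== LEMMAS AND PROOFS =====

-- the maximal runs of the sequence, each with its length (proof-side reference object)
def pvRuns : List Char → List (Char × Int)
  | [] => []
  | c :: cs =>
      (c, 1 + ((cs.takeWhile (· = c)).length : Int)) :: pvRuns (cs.dropWhile (· = c))
  termination_by cs => cs.length
  decreasing_by
    simpa using Nat.lt_succ_of_le (List.length_dropWhile_le (· = c) cs)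

-- appending one run's length under its character's key
def pvStepB (d : PySem.Dict String (List Int)) (p : Char × Int) : PySem.Dict String (List Int) :=
  d.modify (String.singleton p.1) [] (fun l => l ++ [p.2])


-- head of dropWhile fails the predicate
theorem pv_dropWhile_head {p : Char → Bool} : ∀ {l t : List Char} {x : Char},
    l.dropWhile p = x :: t → p x = false := by
  intro l
  induction l with
  | nil => intro t x h; simp at h
  | cons a as ih =>
      intro t x h
      by_cases hp : p a
      · exact ih (by simpa [List.dropWhile_cons, hp] using h)
      · simp [hp] at h
        simpa [← h.1] using hp

-- getD through the cast map
theorem pv_getD_castmap (l : List Nat) (n : Nat) :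
    (l.map (fun i : Nat => (i : Int))).getD n 0 = ((l.getD n 0 : Nat) : Int) := by
  simp [List.getD_eq_getElem?_getD, List.getElem?_map]
  cases l[n]? <;> simp

-- zipWith over indices shifted by k, when the char list is shifted accordingly
theorem pv_zipWith_shift (cc rest : List Char) (k : Nat)
    (hget : ∀ a : Nat, cc.getD (a + k) ' ' = rest.getD a ' ') :
    ∀ (l₁ l₂ : List Nat),
      List.zipWith (fun (a b : Nat) => (cc.getD a ' ', (b : Int) - (a : Int)))
          (l₁.map (· + k)) (l₂.map (· + k))
        = List.zipWith (fun (a b : Nat) => (rest.getD a ' ', (b : Int) - (a : Int))) l₁ l₂ := by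
  intro l₁
  induction l₁ with
  | nil => intro l₂; simp
  | cons a t ih =>
      intro l₂
      cases l₂ with
      | nil => simp
      | cons b u =>
          simp only [List.map_cons, List.zipWith_cons_cons, ih u, List.cons.injEq,
            Prod.mk.injEq]
          exact ⟨⟨hget a, by push_cast; ring⟩, trivial⟩

-- indexing into the boundary list N ++ [L]
theorem pv_bounds_self (N : List Nat) (L j : Nat) (hj : j < N.length) :
    (N ++ [L]).getD j 0 = N[j] := by
  rw [List.getD_eq_getElem?_getD, List.getElem?_append_left hj, List.getElem?_eq_getElem hj]
  rfl

theorem pv_bounds_succ (N : List Nat) (L j : Nat) (h2 : j < (N.tail ++ [L]).length)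
    (hne : N ≠ []) :
    (N ++ [L]).getD (j + 1) 0 = (N.tail ++ [L])[j] := by
  cases N with
  | nil => exact absurd rfl hne
  | cons n0 T =>
      simp only [List.cons_append, List.tail_cons] at h2 ⊢
      rw [List.getD_eq_getElem?_getD, List.getElem?_cons_succ, List.getElem?_eq_getElem h2]
      rfl

-- natural-number view of pvStarts
def pvNatStarts (s : List Char) : List Nat :=
  (List.range s.length).filter (fun i : Nat => pvIsStart s (i : Int))

theorem pvStarts_eq_map (s : List Char) : pvStarts s = (pvNatStarts s).map (fun i : Nat => (i : Int)) := by
  unfold pvStarts pvNatStarts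
  rw [PySem.List.pyRange_zero_natCast, List.filter_map]
  rfl

-- the run pairs, computed B's way from the start indices
def pvNatPairs (s : List Char) : List (Char × Int) :=
  List.zipWith (fun (a b : Nat) => (s.getD a ' ', (b : Int) - (a : Int)))
    (pvNatStarts s) ((pvNatStarts s).tail ++ [s.length])

-- shift lemma: the starts of `c :: cs` are 0 followed by the starts of the rest shifted
theorem pvNatStarts_cons (c : Char) (cs : List Char) :
    pvNatStarts (c :: cs) =
      0 :: (pvNatStarts (cs.dropWhile (· = c))).map (· + ((cs.takeWhile (· = c)).length + 1)) := by
  set tw := cs.takeWhile (· = c) with htw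
  set rest := cs.dropWhile (· = c) with hrest
  set k := tw.length + 1 with hk
  have hcs : tw ++ rest = cs := List.takeWhile_append_dropWhile
  have hpref : ∀ i, i < k → (c :: cs)[i]? = some c := by
    intro i hi
    match i with
    | 0 => simp
    | j + 1 =>
        have hj : j < tw.length := by omega
        have hmem : tw[j] ∈ tw := List.getElem_mem hj
        have hc : tw[j] = c := by
          simpa using List.mem_takeWhile_imp hmem
        rw [List.getElem?_cons_succ, ← hcs, List.getElem?_append_left hj,
          List.getElem?_eq_getElem hj, hc]
  have hshift : ∀ j, (c :: cs)[k + j]? = rest[j]? := by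
    intro j
    have hsplit : c :: cs = (c :: tw) ++ rest := by rw [← hcs]; rfl
    rw [hsplit, List.getElem?_append_right (by simp only [List.length_cons]; omega)]
    congr 1
    simp only [List.length_cons]
    omega
  have hlen : (c :: cs).length = k + rest.length := by
    have := congrArg List.length hcs
    simp only [List.length_append] at this
    simp only [List.length_cons, hk]
    omega
  unfold pvNatStarts
  rw [hlen, List.range_add, List.filter_append]
  have hpart1 : (List.range k).filter (fun i : Nat => pvIsStart (c :: cs) (i : Int)) = [0] := by
    rw [hk, List.range_succ_eq_map, List.filter_cons]
    have h0 : pvIsStart (c :: cs) ((0 : Nat) : Int) = true := by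
      simp [pvIsStart]
    rw [if_pos h0, List.filter_map, List.filter_eq_nil_iff.mpr, List.map_nil]
    intro j hj
    have hj' : j < tw.length := by simpa using hj
    simp only [Function.comp]
    have e1 : PySem.List.pyGet? (c :: cs) ((Nat.succ j : Nat) : Int) = some c := by
      rw [PySem.List.pyGet?_natCast]
      exact hpref (j + 1) (by omega)
    have e2 : PySem.List.pyGet? (c :: cs) (((Nat.succ j : Nat) : Int) - 1) = some c := by
      have : ((Nat.succ j : Nat) : Int) - 1 = ((j : Nat) : Int) := by push_cast; ring
      rw [this, PySem.List.pyGet?_natCast]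
      exact hpref j (by omega)
    unfold pvIsStart
    rw [e1, e2]
    simp
    all_goals omega
  have hpart2 : ((List.range rest.length).map (k + ·)).filter
        (fun i : Nat => pvIsStart (c :: cs) (i : Int))
      = (pvNatStarts rest).map (· + k) := by
    rw [List.filter_map]
    have hcong : ∀ j ∈ List.range rest.length,
        ((fun i : Nat => pvIsStart (c :: cs) (i : Int)) ∘ (k + ·)) j
          = (fun i : Nat => pvIsStart rest (i : Int)) j := by
      intro j hj
      have hjlt : j < rest.length := by simpa using hj
      simp only [Function.comp]
      match j with
      | 0 =>
          obtain ⟨r, t, hr⟩ : ∃ r t, rest = r :: t := by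
            cases hrr : rest with
            | nil => rw [hrr] at hjlt; simp at hjlt
            | cons r t => exact ⟨r, t, rfl⟩
          have hrc : r ≠ c := by
            have := pv_dropWhile_head (hrest ▸ hr)
            simpa using this
          have e1 : PySem.List.pyGet? (c :: cs) ((k + 0 : Nat) : Int) = some r := by
            rw [PySem.List.pyGet?_natCast, hshift 0, hr]; rfl
          have e2 : PySem.List.pyGet? (c :: cs) (((k + 0 : Nat) : Int) - 1) = some c := by
            have : ((k + 0 : Nat) : Int) - 1 = ((tw.length : Nat) : Int) := by omega
            rw [this, PySem.List.pyGet?_natCast]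
            exact hpref tw.length (by omega)
          have hk0 : (((k + 0 : Nat) : Int) == 0) = false := by
            rw [beq_eq_false_iff_ne]; omega
          unfold pvIsStart
          rw [e1, e2, hk0]
          simp [hrc]
      | j' + 1 =>
          have e1 : PySem.List.pyGet? (c :: cs) ((k + (j' + 1) : Nat) : Int)
              = PySem.List.pyGet? rest (((j' + 1 : Nat) : Int)) := by
            rw [PySem.List.pyGet?_natCast, PySem.List.pyGet?_natCast]
            exact hshift (j' + 1)
          have e2 : PySem.List.pyGet? (c :: cs) (((k + (j' + 1) : Nat) : Int) - 1)
              = PySem.List.pyGet? rest ((((j' + 1 : Nat) : Int)) - 1) := by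
            have ha : ((k + (j' + 1) : Nat) : Int) - 1 = ((k + j' : Nat) : Int) := by
              push_cast; ring
            have hb : (((j' + 1 : Nat) : Int)) - 1 = ((j' : Nat) : Int) := by
              push_cast; ring
            rw [ha, hb, PySem.List.pyGet?_natCast, PySem.List.pyGet?_natCast]
            exact hshift j'
          have hk1 : (((k + (j' + 1) : Nat) : Int) == 0) = false := by
            rw [beq_eq_false_iff_ne]; omega
          have hk2 : ((((j' + 1 : Nat) : Int)) == 0) = false := by
            rw [beq_eq_false_iff_ne]; omega
          unfold pvIsStart
          rw [e1, e2, hk1, hk2]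
    rw [List.filter_congr hcong]
    unfold pvNatStarts
    exact List.map_congr_left fun j _ => Nat.add_comm k j
  rw [hpart1, hpart2]
  rfl

theorem pvNatPairs_eq_runs (s : List Char) : pvNatPairs s = pvRuns s := by
  induction s using pvRuns.induct with
  | case1 => simp [pvNatPairs, pvNatStarts, pvRuns]
  | case2 c cs ih =>
      set tw := cs.takeWhile (· = c) with htw
      set rest := cs.dropWhile (· = c) with hrest
      set k := tw.length + 1 with hk
      have hcs : tw ++ rest = cs := List.takeWhile_append_dropWhile
      have hlen : (c :: cs).length = k + rest.length := by
        have := congrArg List.length hcs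
        simp only [List.length_append] at this
        simp only [List.length_cons, hk]
        omega
      have hgetshift : ∀ a : Nat, (c :: cs).getD (a + k) ' ' = rest.getD a ' ' := by
        intro a
        have hsplit : c :: cs = (c :: tw) ++ rest := by rw [← hcs]; rfl
        rw [List.getD_eq_getElem?_getD, List.getD_eq_getElem?_getD, hsplit,
          List.getElem?_append_right (by simp only [List.length_cons]; omega)]
        congr 2
        simp only [List.length_cons]
        omega
      have hruns : pvRuns (c :: cs) = (c, 1 + (tw.length : Int)) :: pvRuns rest := by
        rw [pvRuns.eq_def]
      have hkInt : 1 + (tw.length : Int) = ((k : Nat) : Int) := by omega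
      rw [hruns, hkInt, ← ih]
      unfold pvNatPairs
      rw [pvNatStarts_cons, ← htw, ← hrest, ← hk]
      cases hN : pvNatStarts rest with
      | nil =>
          have hrestnil : rest = [] := by
            cases hrr : rest with
            | nil => rfl
            | cons r t =>
                rw [hrr, pvNatStarts_cons] at hN
                exact absurd hN (List.cons_ne_nil _ _)
          rw [hrestnil] at hN ⊢
          simp only [List.map_nil, List.tail_cons, List.nil_append, List.zipWith_cons_cons,
            List.zipWith_nil_right, List.zipWith_nil_left]
          have : (c :: cs).length = k := by rw [hlen, hrestnil]; rfl
          rw [this]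
          simp
      | cons n0 T =>
          have hn0 : n0 = 0 := by
            cases hrr : rest with
            | nil => rw [hrr] at hN; simp [pvNatStarts] at hN
            | cons r t =>
                rw [hrr, pvNatStarts_cons] at hN
                injection hN with h1 _
                exact h1.symm
          subst hn0
          simp only [List.map_cons, List.tail_cons, Nat.zero_add, List.cons_append,
            List.zipWith_cons_cons]
          congr 1
          have hTm1 : (k :: T.map (· + k)) = (0 :: T).map (· + k) := by simp
          have hTm2 : (T.map (· + k)) ++ [(c :: cs).length]
              = (T ++ [rest.length]).map (· + k) := by
            rw [List.map_append, hlen]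
            simp [Nat.add_comm]
          rw [hTm1, hTm2, pv_zipWith_shift (c :: cs) rest k hgetshift]

-- B's indexed fold is the fold of pvStepB over the run pairs
theorem pvAlt_eq_foldB (sequence : String) :
    count_runlength_per_character_alt sequence =
      ((pvRuns sequence.toList).foldl pvStepB PySem.Dict.empty).items := by
  have halt : count_runlength_per_character_alt sequence
      = ((PySem.List.pyRange 0 (((pvStarts sequence.toList).length : Nat) : Int) 1).foldl
          (fun d j =>
            d.modify (String.singleton (PySem.List.pyGetD sequence.toList
                (PySem.List.pyGetD (pvStarts sequence.toList) j 0) ' ')) []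
              (fun l => l ++ [PySem.List.pyGetD (pvStarts sequence.toList
                    ++ [(sequence.toList.length : Int)]) (j + 1) 0
                  - PySem.List.pyGetD (pvStarts sequence.toList
                    ++ [(sequence.toList.length : Int)]) j 0]))
          PySem.Dict.empty).items := rfl
  rw [halt]
  set s := sequence.toList with hs
  set N := pvNatStarts s with hN
  set L := s.length with hL
  set NB := N ++ [L] with hNB
  have hb : pvStarts s ++ [(L : Int)] = NB.map (fun i : Nat => (i : Int)) := by
    rw [pvStarts_eq_map, hNB, List.map_append]; rfl
  have hgp : ∀ (d : PySem.Dict String (List Int)) (j : Nat),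
      d.modify (String.singleton (PySem.List.pyGetD s (PySem.List.pyGetD (pvStarts s) ((j : Nat) : Int) 0) ' ')) []
        (fun l => l ++ [PySem.List.pyGetD (pvStarts s ++ [(L : Int)]) (((j : Nat) : Int) + 1) 0
            - PySem.List.pyGetD (pvStarts s ++ [(L : Int)]) ((j : Nat) : Int) 0])
      = pvStepB d (s.getD (N.getD j 0) ' ',
          ((NB.getD (j + 1) 0 : Nat) : Int) - ((NB.getD j 0 : Nat) : Int)) := by
    intro d j
    have e1 : PySem.List.pyGetD (pvStarts s) ((j : Nat) : Int) 0 = ((N.getD j 0 : Nat) : Int) := by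
      rw [PySem.List.pyGetD_natCast, pvStarts_eq_map, pv_getD_castmap]
    have e2 : PySem.List.pyGetD (pvStarts s ++ [(L : Int)]) ((j : Nat) : Int) 0
        = ((NB.getD j 0 : Nat) : Int) := by
      rw [PySem.List.pyGetD_natCast, hb, pv_getD_castmap]
    have e3 : PySem.List.pyGetD (pvStarts s ++ [(L : Int)]) (((j : Nat) : Int) + 1) 0
        = ((NB.getD (j + 1) 0 : Nat) : Int) := by
      have : ((j : Nat) : Int) + 1 = (((j + 1 : Nat)) : Int) := by push_cast; ring
      rw [this, PySem.List.pyGetD_natCast, hb, pv_getD_castmap]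
    rw [e1, e2, e3, PySem.List.pyGetD_natCast]
    rfl
  have hlenN : (pvStarts s).length = N.length := by
    rw [pvStarts_eq_map, List.length_map, hN]
  have hmap : (List.range N.length).map
      (fun j => ((s.getD (N.getD j 0) ' ',
          ((NB.getD (j + 1) 0 : Nat) : Int) - ((NB.getD j 0 : Nat) : Int)) : Char × Int))
      = pvNatPairs s := by
    unfold pvNatPairs
    rw [← hN, ← hL]
    apply List.ext_getElem
    · cases N with
      | nil => simp
      | cons n0 T => simp
    · intro j hj1 hj2
      have hjN : j < N.length := by simpa using hj1
      have hjT : j < (N.tail ++ [L]).length := by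
        simp only [List.length_zipWith, lt_min_iff] at hj2
        exact hj2.2
      simp only [List.getElem_map, List.getElem_range, List.getElem_zipWith]
      have hNne : N ≠ [] := by
        intro h
        rw [h] at hjN
        simp at hjN
      rw [hNB, pv_bounds_succ N L j hjT hNne, pv_bounds_self N L j hjN,
        List.getD_eq_getElem N 0 hjN]
  rw [hlenN, PySem.List.pyRange_zero_natCast, List.foldl_map]
  simp only [hgp]
  have hfold : (List.range N.length).foldl
      (fun d j => pvStepB d (s.getD (N.getD j 0) ' ',
        ((NB.getD (j + 1) 0 : Nat) : Int) - ((NB.getD j 0 : Nat) : Int))) PySem.Dict.empty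
      = ((List.range N.length).map
          (fun j => ((s.getD (N.getD j 0) ' ',
            ((NB.getD (j + 1) 0 : Nat) : Int) - ((NB.getD j 0 : Nat) : Int)) : Char × Int))).foldl
          pvStepB PySem.Dict.empty := by
    rw [List.foldl_map]
  rw [hfold, hmap, pvNatPairs_eq_runs]

-- ===== A-side lemmas =====

-- two modifies at the same key compose
theorem pv_modify_modify {d : PySem.Dict String (List Int)} (k : String) (d0 : List Int)
    (f g : List Int → List Int) :
    (d.modify k d0 f).modify k d0 g = d.modify k d0 (fun v => g (f v)) := by
  simp [PySem.Dict.modify, PySem.Dict.getD_insert_self, PySem.Dict.insert_insert_self]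

-- `l[-1] += 1` on a list ending in m turns the final m into m + 1
theorem pv_incLast_append (l : List Int) (m : Int) :
    PySem.List.pySetD (l ++ [m]) (-1) (PySem.List.pyGetD (l ++ [m]) (-1) 0 + 1) = l ++ [m + 1] := by
  rw [PySem.List.pyGetD_neg_one_append_singleton]
  simp [PySem.List.pySetD, PySem.List.pySet?, PySem.List.pyIdx?]

-- main invariant: once A has opened a run of `c` counted m so far, finishing the input the
-- A way equals the run-pair fold over the pending run (extended by the remaining copies of c)
-- followed by the runs of the rest.
theorem pv_main (cs : List Char) : ∀ (c : Char) (m : Int) (d : PySem.Dict String (List Int)),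
    (cs.foldl pvStepA (d.modify (String.singleton c) [] (fun l => l ++ [m]), some c)).1
      = (((c, m + ((cs.takeWhile (· = c)).length : Int)) :: pvRuns (cs.dropWhile (· = c))).foldl
          pvStepB d) := by
  induction cs with
  | nil => intro c m d; rw [pvRuns.eq_def]; simp [pvStepB]
  | cons x rest ih =>
      intro c m d
      by_cases hx : x = c
      · subst hx
        have h1 : pvStepA (d.modify (String.singleton x) [] (fun l => l ++ [m]), some x) x
            = (d.modify (String.singleton x) [] (fun l => l ++ [m + 1]), some x) := by
          simp only [pvStepA]
          rw [if_neg (show ¬ some x ≠ some x by simp), pv_modify_modify]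
          exact congrArg (fun f => (d.modify (String.singleton x) [] f, some x))
            (funext fun l => pv_incLast_append l m)
        have harith : m + 1 + ((rest.takeWhile (· = x)).length : Int)
            = m + ((((x :: rest).takeWhile (· = x)).length : Int)) := by
          simp; ring
        rw [List.foldl_cons, h1, ih x (m + 1) d, harith,
          show (x :: rest).dropWhile (· = x) = rest.dropWhile (· = x) by
            simp]
      · have h1 : pvStepA (d.modify (String.singleton c) [] (fun l => l ++ [m]), some c) x
            = ((d.modify (String.singleton c) [] (fun l => l ++ [m])).modify
                (String.singleton x) [] (fun l => l ++ [1]), some x) := by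
          simp only [pvStepA]
          rw [if_pos (show some x ≠ some c by simp [hx])]
        rw [List.foldl_cons, h1,
          ih x 1 (d.modify (String.singleton c) [] (fun l => l ++ [m])),
          show (x :: rest).takeWhile (· = c) = [] by simp [hx],
          show (x :: rest).dropWhile (· = c) = x :: rest by simp [hx]]
        conv_rhs => rw [pvRuns.eq_def]
        simp [pvStepB]

-- ===== VERDICT (by name: the statement is the Claim_ definition above) =====
theorem count_runlength_per_character_spec : Claim_equal_count_runlength_per_character := by
  intro sequence _
  unfold Spec_count_runlength_per_character
  rw [pvAlt_eq_foldB]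
  unfold count_runlength_per_character
  cases h : sequence.toList with
  | nil => simp [pvRuns]
  | cons c rest =>
      have h0 : pvStepA (PySem.Dict.empty, none) c
          = ((PySem.Dict.empty : PySem.Dict String (List Int)).modify
              (String.singleton c) [] (fun l => l ++ [1]), some c) := by
        simp [pvStepA]
      rw [List.foldl_cons, h0, pv_main rest c 1 PySem.Dict.empty, pvRuns]
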